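-- pv_equiv track=rewrite | github.com/Researcher-Feng/Cross2DL | data_process/code_utils/clean.py | finding_flag
-- ===== SOURCE A (Python) =====
-- def finding_flag(c_code, tag, return_note):
--     # 假设tag为单引号
--     start_index = c_code.find(tag)
--     # 有单引号
--     if start_index != -1:
--         flag_find = 1
--         next_index = start_index + 1
--         while True:
--             end_index = c_code.find(tag, next_index)
--             if next_index == -1 or end_index == -1:
--                 break
--             if flag_find > 0:
--                 check_snippet = c_code[next_index: end_index]
--                 if return_note in check_snippet:
--                     return 1
--             next_index = end_index + 1
--             flag_find = -flag_find
--         # 有单引号但没有发现问题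
--         return -1
--     # 无单引号
--     else:
--         return 0
-- ===== SOURCE B (Python) =====
-- def _scan(c_code, return_note, occ):
--     if len(occ) < 2:
--         return -1
--     if return_note in c_code[occ[0] + 1: occ[1]]:
--         return 1
--     return _scan(c_code, return_note, occ[2:])
--
--
-- def finding_flag(c_code, tag, return_note):
--     # all positions (overlapping) where tag occurs, computed once
--     occ = [i for i in range(len(c_code) + 1) if c_code[i:].startswith(tag)]
--     if not occ:
--         return 0
--     return _scan(c_code, return_note, occ)
-- ===== Notes on version B (the rewrite author's own statement) =====
-- stated objective: alternative
-- what changed: Replaces A's stateful while-loop (repeated find with a sign-alternating flag and a moving cursor) by first materialising the list of all (overlapping) occurrence positions of tag in one comprehension and then checking return_note in the region between each consecutive pair of occurrences via a simple recursion over pairs.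
import Mathlib
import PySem

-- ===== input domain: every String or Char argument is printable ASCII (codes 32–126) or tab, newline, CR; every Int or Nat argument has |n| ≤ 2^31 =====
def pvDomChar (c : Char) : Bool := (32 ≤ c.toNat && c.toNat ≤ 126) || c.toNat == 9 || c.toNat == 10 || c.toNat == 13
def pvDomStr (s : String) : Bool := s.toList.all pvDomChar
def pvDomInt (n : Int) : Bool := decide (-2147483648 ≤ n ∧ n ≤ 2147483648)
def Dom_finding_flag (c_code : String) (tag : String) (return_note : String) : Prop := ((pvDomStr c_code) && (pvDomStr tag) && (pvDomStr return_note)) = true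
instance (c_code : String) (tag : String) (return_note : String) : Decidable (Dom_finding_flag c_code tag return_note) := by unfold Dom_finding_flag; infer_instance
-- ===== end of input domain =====

-- B replaces A's stateful while-loop (repeated find, sign-alternating flag) by materialising all
-- occurrence positions of tag once and recursing over consecutive pairs; objective: alternative.

-- ===== PORT A =====
-- bounds facts about Python's s.find(sub, start), needed for the termination of A's while-loop
lemma pvFindFrom_bounds (cs t : List Char) (st : Int)
    (h : PySem.Chars.findFrom cs t st none ≠ -1) :
    0 ≤ PySem.Chars.findFrom cs t st none ∧
    PySem.Chars.findFrom cs t st none ≤ (cs.length : Int) ∧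
    (0 ≤ st → st ≤ PySem.Chars.findFrom cs t st none) := by
  unfold PySem.Chars.findFrom at *
  have hge := PySem.Chars.neg_one_le_find (List.drop (if st < 0 then if st + ↑cs.length < 0 then 0 else st + ↑cs.length else st).toNat (List.take (↑cs.length : Int).toNat cs)) t
  have hle := PySem.Chars.find_le_length (List.drop (if st < 0 then if st + ↑cs.length < 0 then 0 else st + ↑cs.length else st).toNat (List.take (↑cs.length : Int).toNat cs)) t
  simp only at h ⊢
  split_ifs at h ⊢ with h1 h2 h3 <;>
    simp_all [List.length_drop] <;> omega

-- the while-loop of A: next_index / flag_find are the Python loop state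
def pvLoopA (cs t note : List Char) (next_index flag_find : Int) : Int :=
  let end_index := PySem.Chars.findFrom cs t next_index none
  if next_index = -1 ∨ end_index = -1 then -1
  else if flag_find > 0 ∧ PySem.Chars.isIn note (PySem.List.slice cs (some next_index) (some end_index)) = true then 1
  else pvLoopA cs t note (end_index + 1) (-flag_find)
termination_by ((cs.length : Int) + 1 - next_index).toNat
decreasing_by
  rename_i h1 h2
  rw [not_or] at h1
  have hb := pvFindFrom_bounds cs t next_index h1.2
  by_cases hp : 0 ≤ next_index
  · have := hb.2.2 hp; omega
  · omega

def finding_flag (c_code : String) (tag : String) (return_note : String) : Int :=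
  let cs := c_code.toList
  let start_index := PySem.Chars.find cs tag.toList
  if start_index ≠ -1 then
    pvLoopA cs tag.toList return_note.toList (start_index + 1) 1
  else 0

-- ===== PORT B =====
-- _scan: recursion over consecutive pairs of occurrence positions
def pvScanPairs (cs note : List Char) : List Int → Int
  | a :: b :: rest =>
      if PySem.Chars.isIn note (PySem.List.slice cs (some (a + 1)) (some b)) = true then 1
      else pvScanPairs cs note rest
  | _ => -1

def finding_flag_alt (c_code : String) (tag : String) (return_note : String) : Int :=
  let cs := c_code.toList
  let occ := (PySem.List.pyRange 0 ((cs.length : Int) + 1) 1).filter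
      (fun i => PySem.Chars.startswith (PySem.List.slice cs (some i) none) tag.toList)
  if occ = [] then 0
  else pvScanPairs cs return_note.toList occ

-- ===== PRECONDITION & SPEC =====
def Spec_finding_flag (c_code : String) (tag : String) (return_note : String) (out : Int) : Prop := out = finding_flag_alt c_code tag return_note
instance (c_code : String) (tag : String) (return_note : String) (out : Int) : Decidable (Spec_finding_flag c_code tag return_note out) := by unfold Spec_finding_flag; infer_instance

-- ===== CLAIM (what is proved, stated in full; the proofs are below) =====
def Claim_equal_finding_flag : Prop := ∀ (c_code : String) (tag : String) (return_note : String), Dom_finding_flag c_code tag return_note → Spec_finding_flag c_code tag return_note (finding_flag c_code tag return_note)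

-- ===== LEMMAS AND PROOFS =====

-- the list of all (overlapping) occurrence positions of t in cs, in increasing order
def pvOcc (cs t : List Char) : List Nat :=
  (List.range (cs.length + 1)).filter (fun i => decide (t <+: cs.drop i))

lemma pvOcc_mem (cs t : List Char) (i : Nat) :
    i ∈ pvOcc cs t ↔ i ≤ cs.length ∧ t <+: cs.drop i := by
  simp [pvOcc, List.mem_filter]

lemma pvOcc_sorted (cs t : List Char) : (pvOcc cs t).Pairwise (· < ·) :=
  List.pairwise_lt_range.sublist List.filter_sublist

-- dropping past a sorted filter head
lemma pvFilter_tail (l : List Nat) (hs : l.Pairwise (· < ·)) (k q : Nat) (l' : List Nat)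
    (h : l.filter (fun i => decide (k ≤ i)) = q :: l') :
    l.filter (fun i => decide (q + 1 ≤ i)) = l' := by
  induction l generalizing l' with
  | nil => simp at h
  | cons a rest ih =>
    rcases List.pairwise_cons.mp hs with ⟨ha, hrest⟩
    by_cases hka : k ≤ a
    · have h' : a = q ∧ rest.filter (fun i => decide (k ≤ i)) = l' := by
        constructor
        · have := congrArg List.head? h
          simpa [List.filter_cons, hka] using this
        · have := congrArg List.tail h
          have h2 : rest.filter (fun i => decide (k ≤ i)) = rest :=
            List.filter_eq_self.mpr (fun b hb => by have := ha b hb; simp; omega)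
          simpa [List.filter_cons, hka, h2] using this
      obtain ⟨rfl, hrest'⟩ := h'
      have h1 : rest.filter (fun i => decide (a + 1 ≤ i)) = rest :=
        List.filter_eq_self.mpr (fun b hb => by simpa [Nat.succ_le_iff] using ha b hb)
      have h2 : rest.filter (fun i => decide (k ≤ i)) = rest :=
        List.filter_eq_self.mpr (fun b hb => by have := ha b hb; simp; omega)
      rw [List.filter_cons, if_neg (by simp), h1, ← hrest', h2]
    · have h' : rest.filter (fun i => decide (k ≤ i)) = q :: l' := by
        simpa [List.filter_cons, hka] using h
      have hq : k ≤ q := by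
        have hm : q ∈ rest.filter (fun i => decide (k ≤ i)) := by
          rw [h']; exact List.mem_cons_self ..
        simpa using (List.mem_filter.mp hm).2
      rw [List.filter_cons, if_neg (by simp; omega)]
      exact ih hrest _ h'

-- head of a sorted filter
lemma pvFilter_head (l : List Nat) (hs : l.Pairwise (· < ·)) (k q : Nat)
    (hq : q ∈ l) (hkq : k ≤ q) (hmin : ∀ i ∈ l, k ≤ i → q ≤ i) :
    ∃ l', l.filter (fun i => decide (k ≤ i)) = q :: l' := by
  induction l with
  | nil => simp at hq
  | cons a rest ih =>
    rcases List.pairwise_cons.mp hs with ⟨ha, hrest⟩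
    rcases List.mem_cons.mp hq with rfl | hq'
    · exact ⟨rest.filter (fun i => decide (k ≤ i)),
        by rw [List.filter_cons, if_pos (by simpa using hkq)]⟩
    · have haq : a < q := ha q hq'
      have hak : a < k := by
        by_contra hc
        have := hmin a (List.mem_cons_self ..) (by omega)
        omega
      rw [List.filter_cons, if_neg (by simp; omega)]
      exact ih hrest hq' (fun i hi => hmin i (List.mem_cons_of_mem _ hi))

-- characterisation of Python's find(tag, k) via the occurrence list
lemma pvInfix_of_occ (cs t : List Char) (k i : Nat) (hk : k ≤ i) (hp : t <+: cs.drop i) :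
    t <:+: cs.drop k := by
  have h : cs.drop i = (cs.drop k).drop (i - k) := by
    rw [List.drop_drop]; congr 1; omega
  rw [h] at hp
  exact hp.isInfix.trans (List.drop_suffix _ _).isInfix

lemma pvFindFrom_past (cs t : List Char) (k : Nat) (hk : cs.length < k) :
    PySem.Chars.findFrom cs t (k : Int) none = -1 := by
  unfold PySem.Chars.findFrom
  simp only
  split_ifs <;> first | rfl | omega

lemma pvFindFrom_occ (cs t : List Char) (k : Nat) :
    PySem.Chars.findFrom cs t (k : Int) none =
      (match (pvOcc cs t).filter (fun i => decide (k ≤ i)) with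
       | [] => -1
       | q :: _ => (q : Int)) := by
  by_cases hk : k ≤ cs.length
  · rw [PySem.Chars.findFrom_natCast cs t k hk]
    by_cases hf : PySem.Chars.find (cs.drop k) t = -1
    · have h2 : (pvOcc cs t).filter (fun i => decide (k ≤ i)) = [] := by
        rw [List.filter_eq_nil_iff]
        intro i hi hki
        obtain ⟨hlen, hpre⟩ := (pvOcc_mem cs t i).mp hi
        exact (PySem.Chars.find_eq_neg_one_iff _ _).mp hf
          (pvInfix_of_occ cs t k i (by simpa using hki) hpre)
      rw [h2]
      simp [hf]
    · have hf0 : 0 ≤ PySem.Chars.find (cs.drop k) t := by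
        have := PySem.Chars.neg_one_le_find (cs.drop k) t; omega
      obtain ⟨hpre, hmin⟩ := PySem.Chars.find_spec hf0
      have hfl := PySem.Chars.find_le_length (cs.drop k) t
      have hq : k + (PySem.Chars.find (cs.drop k) t).toNat ∈ pvOcc cs t := by
        rw [pvOcc_mem]
        constructor
        · simp only [List.length_drop] at hfl; omega
        · rw [show cs.drop (k + (PySem.Chars.find (cs.drop k) t).toNat)
              = (cs.drop k).drop (PySem.Chars.find (cs.drop k) t).toNat from by rw [List.drop_drop]]
          exact hpre
      have hmin' : ∀ i ∈ pvOcc cs t, k ≤ i → k + (PySem.Chars.find (cs.drop k) t).toNat ≤ i := by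
        intro i hi hki
        by_contra hc
        obtain ⟨_, hpi⟩ := (pvOcc_mem cs t i).mp hi
        have hni := hmin (i - k) (by omega)
        rw [List.drop_drop, show k + (i - k) = i from by omega] at hni
        exact hni hpi
      obtain ⟨l', hl'⟩ := pvFilter_head _ (pvOcc_sorted cs t) k _ hq (by omega) hmin'
      rw [hl', if_neg hf]
      show ((k : Int) + PySem.Chars.find (cs.drop k) t)
          = ((k + (PySem.Chars.find (cs.drop k) t).toNat : Nat) : Int)
      push_cast
      omega
  · rw [pvFindFrom_past cs t k (by omega)]
    have h2 : (pvOcc cs t).filter (fun i => decide (k ≤ i)) = [] := by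
      rw [List.filter_eq_nil_iff]
      intro i hi
      have := ((pvOcc_mem cs t i).mp hi).1
      simp
      omega
    rw [h2]

-- the spec-side loop of A over the remaining occurrence positions
def pvSpecLoop (cs note : List Char) : Nat → Int → List Nat → Int
  | _, _, [] => -1
  | k, flag, q :: l =>
      if flag > 0 ∧ PySem.Chars.isIn note (PySem.List.slice cs (some (k : Int)) (some (q : Int))) = true then 1
      else pvSpecLoop cs note (q + 1) (-flag) l

lemma pvLoopA_spec (cs t note : List Char) :
    ∀ (l : List Nat) (k : Nat) (flag : Int),
      (pvOcc cs t).filter (fun i => decide (k ≤ i)) = l →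
      pvLoopA cs t note (k : Int) flag = pvSpecLoop cs note k flag l := by
  intro l
  induction l with
  | nil =>
    intro k flag h
    rw [pvLoopA]
    simp only [pvFindFrom_occ cs t k, h]
    simp [pvSpecLoop]
  | cons q l ih =>
    intro k flag h
    have hff : PySem.Chars.findFrom cs t (k : Int) none = (q : Int) := by
      rw [pvFindFrom_occ cs t k, h]
    rw [pvLoopA]
    simp only [hff]
    rw [if_neg (by omega)]
    have htail := pvFilter_tail _ (pvOcc_sorted cs t) k q l h
    rw [pvSpecLoop]
    by_cases hc : flag > 0 ∧ PySem.Chars.isIn note (PySem.List.slice cs (some (k : Int)) (some (q : Int))) = true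
    · rw [if_pos hc, if_pos hc]
    · rw [if_neg hc, if_neg hc]
      rw [show (q : Int) + 1 = ((q + 1 : Nat) : Int) from by push_cast; ring]
      exact ih (q + 1) (-flag) htail

lemma pvScan_eq (cs note : List Char) :
    ∀ (l : List Nat),
      (∀ p : Nat, pvSpecLoop cs note (p + 1) 1 l = pvScanPairs cs note ((p : Int) :: l.map (fun (i : Nat) => (i : Int)))) ∧
      (∀ k : Nat, pvSpecLoop cs note k (-1) l = pvScanPairs cs note (l.map (fun (i : Nat) => (i : Int)))) := by
  intro l
  induction l with
  | nil =>
    constructor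
    · intro p; rfl
    · intro k; rfl
  | cons q l ih =>
    constructor
    · intro p
      simp only [pvSpecLoop, pvScanPairs, List.map_cons, Nat.cast_add, Nat.cast_one]
      by_cases hc : PySem.Chars.isIn note (PySem.List.slice cs (some ((p : Int) + 1)) (some (q : Int))) = true
      · rw [if_pos ⟨by norm_num, hc⟩, if_pos hc]
      · rw [if_neg (fun h => hc h.2), if_neg hc,
          show (-(1 : Int)) = -1 from rfl]
        exact ih.2 (q + 1)
    · intro k
      simp only [pvSpecLoop, List.map_cons]
      rw [if_neg (fun h => absurd h.1 (by norm_num)),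
        show (-(-1 : Int)) = 1 from by norm_num]
      exact ih.1 q

-- B's occurrence list is the cast of pvOcc
lemma pvOccB (cs t : List Char) :
    (PySem.List.pyRange 0 ((cs.length : Int) + 1) 1).filter
        (fun i => PySem.Chars.startswith (PySem.List.slice cs (some i) none) t)
      = (pvOcc cs t).map (fun (i : Nat) => (i : Int)) := by
  have h1 : ((cs.length : Int) + 1) = ((cs.length + 1 : Nat) : Int) := by push_cast; ring
  rw [h1, PySem.List.pyRange_zero_nat, List.filter_map]
  unfold pvOcc
  refine congrArg _ (List.filter_congr ?_)
  intro i _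
  simp only [Function.comp_apply, PySem.List.slice_from_natCast]
  rw [Bool.eq_iff_iff, PySem.Chars.startswith_iff]
  simp

-- ===== VERDICT (by name: the statement is the Claim_ definition above) =====
theorem finding_flag_spec : Claim_equal_finding_flag := by
  intro c_code tag return_note _
  show finding_flag c_code tag return_note = finding_flag_alt c_code tag return_note
  have hA : finding_flag c_code tag return_note =
      (if PySem.Chars.find c_code.toList tag.toList ≠ -1 then
        pvLoopA c_code.toList tag.toList return_note.toList
          (PySem.Chars.find c_code.toList tag.toList + 1) 1
      else 0) := rfl
  have hB : finding_flag_alt c_code tag return_note =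
      (if ((pvOcc c_code.toList tag.toList).map (fun (i : Nat) => (i : Int))) = [] then 0
       else pvScanPairs c_code.toList return_note.toList
          ((pvOcc c_code.toList tag.toList).map (fun (i : Nat) => (i : Int)))) := by
    show (if ((PySem.List.pyRange 0 ((c_code.toList.length : Int) + 1) 1).filter
          (fun i => PySem.Chars.startswith (PySem.List.slice c_code.toList (some i) none) tag.toList)) = [] then 0
        else pvScanPairs c_code.toList return_note.toList
          ((PySem.List.pyRange 0 ((c_code.toList.length : Int) + 1) 1).filter
            (fun i => PySem.Chars.startswith (PySem.List.slice c_code.toList (some i) none) tag.toList))) = _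
    rw [pvOccB]
  have hfilter0 : (pvOcc c_code.toList tag.toList).filter (fun i => decide (0 ≤ i))
      = pvOcc c_code.toList tag.toList :=
    List.filter_eq_self.mpr (fun a _ => by simp)
  have hfind : PySem.Chars.find c_code.toList tag.toList =
      (match pvOcc c_code.toList tag.toList with
       | [] => -1
       | q :: _ => (q : Int)) := by
    rw [← PySem.Chars.findFrom_zero, ← hfilter0]
    exact_mod_cast pvFindFrom_occ c_code.toList tag.toList 0
  rw [hA, hB]
  cases hocc : pvOcc c_code.toList tag.toList with
  | nil =>
    rw [hocc] at hfind
    have hfind2 : PySem.Chars.find c_code.toList tag.toList = -1 := hfind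
    rw [if_neg (by simp [hfind2])]
    simp
  | cons q rest =>
    rw [hocc] at hfind
    have hfind2 : PySem.Chars.find c_code.toList tag.toList = (q : Int) := hfind
    have htail : (pvOcc c_code.toList tag.toList).filter (fun i => decide (q + 1 ≤ i)) = rest := by
      apply pvFilter_tail _ (pvOcc_sorted c_code.toList tag.toList) 0
      rw [hfilter0, hocc]
    rw [hfind2, if_pos (by omega), if_neg (by simp),
      show (q : Int) + 1 = ((q + 1 : Nat) : Int) from by push_cast; ring,
      pvLoopA_spec c_code.toList tag.toList return_note.toList rest (q + 1) 1 htail]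
    simpa using (pvScan_eq c_code.toList return_note.toList rest).1 q
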